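-- pv_equiv track=rewrite | github.com/zzz2010/basespace-ui | peakAnalyzer/ChIPseqPipeline/peaksetOverlap/StringOps.py | CharTranslate
-- ===== SOURCE A (Python) =====
-- def CharTranslate( cString, cFromChars, cToChars ):
--     """Any character of cString that is in cFromChars is replaced by the character
--      from the corresponding position of cToChars.
--     If cToChars is shorter than cFromChars, then characters in cFromChars which
--      have no counterpart in cToChars are removed from the string, shortening it.
--     To remove all dollar signs from a string, you could write...
--      cString = CharTranslate( cString, "$", "" )
--     To change all semicolons into commas, and all underscored into dashes...
--      cString = CharTranslate( cString, ";_", ",-" )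
--     """
--     cResult = ""
--     for c in cString:
--         nPos = cFromChars.find( c )
--         if nPos >= 0:
--             # find counterpart in cToChars
--             if nPos < len( cToChars ):
--                 c = cToChars[nPos]
--                 cResult += c
--         else:
--             # char not found in cFromChars, so don't translate it.
--             cResult += c
--     return cResult
-- ===== SOURCE B (Python) =====
-- def CharTranslate(cString, cFromChars, cToChars):
--     table = {}
--     for i, ch in enumerate(cFromChars):
--         if ord(ch) not in table:
--             table[ord(ch)] = cToChars[i] if i < len(cToChars) else None
--     return cString.translate(table)
-- ===== Notes on version B (the rewrite author's own statement) =====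
-- stated objective: faster
-- what changed: B precomputes an ord-keyed translation table from cFromChars once (first occurrence wins, None = delete) and applies it with str.translate, instead of A's explicit loop calling cFromChars.find for every character of cString.
import Mathlib
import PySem

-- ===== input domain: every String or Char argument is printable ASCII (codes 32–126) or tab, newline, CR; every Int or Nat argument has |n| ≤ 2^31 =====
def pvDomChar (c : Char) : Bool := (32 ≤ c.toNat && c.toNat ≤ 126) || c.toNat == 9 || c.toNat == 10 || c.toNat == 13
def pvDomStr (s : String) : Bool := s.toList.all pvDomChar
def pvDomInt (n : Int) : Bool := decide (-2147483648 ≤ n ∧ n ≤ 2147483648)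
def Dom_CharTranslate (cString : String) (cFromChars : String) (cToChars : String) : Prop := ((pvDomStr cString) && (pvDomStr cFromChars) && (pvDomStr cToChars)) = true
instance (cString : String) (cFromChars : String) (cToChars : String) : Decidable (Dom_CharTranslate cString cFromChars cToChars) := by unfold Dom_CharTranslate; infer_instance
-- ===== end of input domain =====

-- B builds an ord-keyed translation table once from cFromChars and maps it over cString
-- (str.translate style), instead of A's per-character .find scan; return value only, no mutation.

-- ===== PORT A =====
-- literal port of A: for each char of cString, find its position in cFromChars and
-- translate / delete / copy accordingly, appending to the accumulator.
def CharTranslate (cString : String) (cFromChars : String) (cToChars : String) : String :=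
  String.ofList <| cString.toList.foldl (fun cResult c =>
    let nPos : Int := PySem.Str.find cFromChars (String.ofList [c])
    if 0 ≤ nPos then
      if nPos < (PySem.Str.len cToChars : Int) then
        match PySem.Str.pyGet? cToChars nPos with   -- in range here, so `some`
        | some t => cResult ++ [t]
        | none => cResult
      else cResult
    else cResult ++ [c]) []

-- ===== PORT B =====
-- the translation table of Source B: first occurrence wins, value `none` means delete
def pvTable (cFromChars : String) (cToChars : String) : PySem.Dict Int (Option Char) :=
  (PySem.List.enumerate cFromChars.toList 0).foldl (fun table p =>
    if table.contains ((p.2.toNat : Int)) then table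
    else table.insert ((p.2.toNat : Int))
      (if p.1 < (PySem.Str.len cToChars : Int) then PySem.Str.pyGet? cToChars p.1 else none))
    PySem.Dict.empty

def CharTranslate_alt (cString : String) (cFromChars : String) (cToChars : String) : String :=
  let table := pvTable cFromChars cToChars
  String.ofList <| cString.toList.foldl (fun acc c =>
    match table.get? ((c.toNat : Int)) with
    | none => acc ++ [c]          -- not in the table: keep
    | some none => acc            -- mapped to None: delete
    | some (some t) => acc ++ [t]) []

-- ===== PRECONDITION & SPEC =====
def Spec_CharTranslate (cString : String) (cFromChars : String) (cToChars : String) (out : String) : Prop := out = CharTranslate_alt cString cFromChars cToChars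
instance (cString : String) (cFromChars : String) (cToChars : String) (out : String) : Decidable (Spec_CharTranslate cString cFromChars cToChars out) := by unfold Spec_CharTranslate; infer_instance

-- ===== CLAIM (what is proved, stated in full; the proofs are below) =====
def Claim_equal_CharTranslate : Prop := ∀ (cString : String) (cFromChars : String) (cToChars : String), Dom_CharTranslate cString cFromChars cToChars → Spec_CharTranslate cString cFromChars cToChars (CharTranslate cString cFromChars cToChars)

-- ===== LEMMAS AND PROOFS =====

theorem pv_char_toNat_inj {a b : Char} (h : (a.toNat : Int) = (b.toNat : Int)) : a = b := by
  have h2 : a.toNat = b.toNat := by omega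
  simp only [Char.toNat] at h2
  exact Char.ext (UInt32.toNat_inj.mp h2)

theorem pv_singleton_prefix (c : Char) (l : List Char) : [c] <+: l ↔ l.head? = some c := by
  cases l with
  | nil => simp
  | cons a t => simp [List.cons_prefix_cons, eq_comm]

-- single-character find = first index of the character (or -1)
theorem pv_find_singleton (s : List Char) (c : Char) :
    PySem.Chars.find s [c] =
      match s.findIdx? (fun x => x == c) with
      | some i => (i : Int)
      | none => -1 := by
  rcases h : s.findIdx? (fun x => x == c) with _ | i
  · show PySem.Chars.find s [c] = -1
    rw [List.findIdx?_eq_none_iff] at h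
    rw [PySem.Chars.find_eq_neg_one_iff]
    intro hinf
    have hc : c ∈ s := hinf.subset (List.mem_singleton_self c)
    simpa using h c hc
  · show PySem.Chars.find s [c] = (i : Int)
    rw [List.findIdx?_eq_some_iff_getElem] at h
    obtain ⟨hi, hpi, hmin⟩ := h
    have hci : s[i]? = some c := by
      rw [List.getElem?_eq_some_iff]; exact ⟨hi, by simpa using hpi⟩
    have hinf : [c] <:+: s := by
      have h1 : [c] <+: s.drop i := by
        rw [pv_singleton_prefix, List.head?_drop]; exact hci
      exact h1.isInfix.trans (List.drop_suffix i s).isInfix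
    have hnn : 0 ≤ PySem.Chars.find s [c] := by
      rw [PySem.Chars.find_nonneg_iff]; exact hinf
    obtain ⟨hpre, hminf⟩ := PySem.Chars.find_spec hnn
    have hcn : s[(PySem.Chars.find s [c]).toNat]? = some c := by
      rw [← List.head?_drop, ← pv_singleton_prefix]; exact hpre
    have hne : (PySem.Chars.find s [c]).toNat = i := by
      rcases Nat.lt_trichotomy (PySem.Chars.find s [c]).toNat i with hlt | heq | hgt
      · exfalso
        have hlen : (PySem.Chars.find s [c]).toNat < s.length := Nat.lt_trans hlt hi
        have := hmin _ hlt
        rw [List.getElem?_eq_some_iff] at hcn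
        obtain ⟨_, hv⟩ := hcn
        exact this (by simpa using hv)
      · exact heq
      · exfalso
        apply hminf i hgt
        rw [pv_singleton_prefix, List.head?_drop]
        exact hci
    omega

-- the table lookup after folding over `enumerate fl k`, with accumulated dict d
theorem pv_tbl_get (cToChars : String) (fl : List Char) (k : Nat) (d : PySem.Dict Int (Option Char)) (c : Char) :
    ((PySem.List.enumerate fl (k : Int)).foldl (fun table p =>
        if table.contains ((p.2.toNat : Int)) then table
        else table.insert ((p.2.toNat : Int))
          (if p.1 < (PySem.Str.len cToChars : Int) then PySem.Str.pyGet? cToChars p.1 else none)) d).get? ((c.toNat : Int)) =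
      (d.get? ((c.toNat : Int))).or
        (match fl.findIdx? (fun x => x == c) with
         | some i => some (if ((k + i : Nat) : Int) < (PySem.Str.len cToChars : Int) then PySem.Str.pyGet? cToChars ((k + i : Nat) : Int) else none)
         | none => none) := by
  induction fl generalizing k d with
  | nil => simp [PySem.List.enumerate_nil, Option.or_none]
  | cons a fl ih =>
    rw [PySem.List.enumerate_cons]
    simp only [List.foldl_cons]
    have hcast : ((k : Int) + 1) = (((k + 1 : Nat)) : Int) := by push_cast; ring
    rw [hcast, ih (k + 1)]
    by_cases hca : c = a
    · subst hca
      have hcc : ((c == c) = true) := by simp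
      by_cases hmem : d.contains ((c.toNat : Int)) = true
      · rw [if_pos hmem]
        obtain ⟨v, hv⟩ : ∃ v, d.get? ((c.toNat : Int)) = some v := by
          rw [PySem.Dict.contains_eq_isSome_get?] at hmem
          exact Option.isSome_iff_exists.mp hmem
        simp [hv, Option.or]
      · rw [if_neg hmem]
        have hd : d.get? ((c.toNat : Int)) = none := by
          rw [PySem.Dict.contains_eq_isSome_get?] at hmem
          simpa using hmem
        rw [PySem.Dict.get?_insert, if_pos rfl, hd, Option.none_or,
          List.findIdx?_cons, if_pos hcc]
        simp [Option.or]
    · have hac : ¬ ((a == c) = true) := by simp [Ne.symm hca]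
      have hrest :
          (d.get? ((c.toNat : Int))).or
              (match fl.findIdx? (fun x => x == c) with
               | some i => some (if ((k + 1 + i : Nat) : Int) < (PySem.Str.len cToChars : Int) then PySem.Str.pyGet? cToChars ((k + 1 + i : Nat) : Int) else none)
               | none => none) =
            (d.get? ((c.toNat : Int))).or
              (match (a :: fl).findIdx? (fun x => x == c) with
               | some i => some (if ((k + i : Nat) : Int) < (PySem.Str.len cToChars : Int) then PySem.Str.pyGet? cToChars ((k + i : Nat) : Int) else none)
               | none => none) := by
        rw [List.findIdx?_cons, if_neg hac]
        rcases hfi : fl.findIdx? (fun x => x == c) with _ | i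
        · rfl
        · simp only [Option.map_some]
          have : k + 1 + i = k + (i + 1) := by omega
          rw [this]
      by_cases hmem : d.contains ((a.toNat : Int)) = true
      · rw [if_pos hmem]; exact hrest
      · rw [if_neg hmem]
        have hne : (c.toNat : Int) ≠ (a.toNat : Int) := fun h => hca (pv_char_toNat_inj h)
        rw [PySem.Dict.get?_insert, if_neg hne]
        exact hrest

-- per-character agreement of the two loop bodies
theorem pv_step_eq (cFromChars : String) (cToChars : String) (acc : List Char) (c : Char) :
    (let nPos : Int := PySem.Str.find cFromChars (String.ofList [c])
     if 0 ≤ nPos then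
       if nPos < (PySem.Str.len cToChars : Int) then
         match PySem.Str.pyGet? cToChars nPos with
         | some t => acc ++ [t]
         | none => acc
       else acc
     else acc ++ [c]) =
    (match (pvTable cFromChars cToChars).get? ((c.toNat : Int)) with
     | none => acc ++ [c]
     | some none => acc
     | some (some t) => acc ++ [t]) := by
  have htbl := pv_tbl_get cToChars cFromChars.toList 0 PySem.Dict.empty c
  have htbl' : (pvTable cFromChars cToChars).get? ((c.toNat : Int)) =
      (match cFromChars.toList.findIdx? (fun x => x == c) with
       | some i => some (if ((i : Nat) : Int) < (PySem.Str.len cToChars : Int) then PySem.Str.pyGet? cToChars ((i : Nat) : Int) else none)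
       | none => none) := by
    unfold pvTable
    rw [show (0 : Int) = ((0 : Nat) : Int) from rfl, htbl]
    simp [PySem.Dict.get?_empty, Option.none_or]
  have hfind : PySem.Str.find cFromChars (String.ofList [c]) =
      PySem.Chars.find cFromChars.toList [c] := by
    simp [PySem.Str.find_eq]
  rw [htbl']
  simp only [hfind, pv_find_singleton]
  rcases hfi : cFromChars.toList.findIdx? (fun x => x == c) with _ | i
  · norm_num
  · simp only []
    rw [if_pos (by positivity)]
    by_cases hlt : ((i : Nat) : Int) < (PySem.Str.len cToChars : Int)
    · rw [if_pos hlt, if_pos hlt]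
      have hlen : i < cToChars.toList.length := by
        rw [PySem.Str.len_eq] at hlt
        exact_mod_cast hlt
      rw [show PySem.Str.pyGet? cToChars ((i : Nat) : Int) = some cToChars.toList[i] by
        simp [List.getElem?_eq_getElem hlen]]
    · rw [if_neg hlt, if_neg hlt]

-- ===== VERDICT (by name: the statement is the Claim_ definition above) =====
theorem CharTranslate_spec : Claim_equal_CharTranslate := by
  intro cString cFromChars cToChars _
  unfold Spec_CharTranslate CharTranslate CharTranslate_alt
  congr 1
  apply PySem.List.foldl_congr_mem
  intro acc c _
  exact pv_step_eq cFromChars cToChars acc c
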